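-- pv_equiv track=rewrite | github.com/cookiedan42/OperationsResearch_1 | OR/TwoFactorGraph.py | get_MinMaxY
-- ===== SOURCE A (Python) =====
-- def get_MinMaxY(myLimits):
--     store = dict()
--     for i in myLimits:
--         if i[0] in store.keys():
--             store[i[0]] +=[i]
--         else:
--             store[i[0]] =[i]
--     minVals = []
--     maxVals = []
--     for k,v in store.items():
--         maxY = max([i[1] for i in v])
--         minY = min([i[1] for i in v])
--         minVals.append((k,minY))
--         maxVals.append((k,maxY))
--     minVals.sort(key=lambda x:x[0])
--     maxVals.sort(key=lambda x:x[0])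
--     return minVals,maxVals
-- ===== SOURCE B (Python) =====
-- def get_MinMaxY(myLimits):
--     agg = {}
--     for x, y in myLimits:
--         if x in agg:
--             p = agg[x]
--             if y < p[0]:
--                 p[0] = y
--             if y > p[1]:
--                 p[1] = y
--         else:
--             agg[x] = [y, y]
--     ks = sorted(agg)
--     minVals = [(x, agg[x][0]) for x in ks]
--     maxVals = [(x, agg[x][1]) for x in ks]
--     return minVals, maxVals
-- ===== Notes on version B (the rewrite author's own statement) =====
-- stated objective: simpler
-- what changed: B keeps one running [min,max] pair per x updated in a single pass instead of storing every point per x and re-scanning each group twice with max()/min(); output is produced over the sorted keys instead of sorting the two pair lists afterwards.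
import Mathlib
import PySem

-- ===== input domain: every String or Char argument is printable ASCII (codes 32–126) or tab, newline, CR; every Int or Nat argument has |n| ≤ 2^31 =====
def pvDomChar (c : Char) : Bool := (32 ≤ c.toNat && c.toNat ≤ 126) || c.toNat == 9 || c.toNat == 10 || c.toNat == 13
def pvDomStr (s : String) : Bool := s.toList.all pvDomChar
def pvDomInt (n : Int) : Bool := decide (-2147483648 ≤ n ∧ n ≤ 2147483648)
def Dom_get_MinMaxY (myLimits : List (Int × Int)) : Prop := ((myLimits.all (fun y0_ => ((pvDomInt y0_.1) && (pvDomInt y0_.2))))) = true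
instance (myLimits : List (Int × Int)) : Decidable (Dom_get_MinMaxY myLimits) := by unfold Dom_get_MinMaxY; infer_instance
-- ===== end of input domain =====

-- B keeps a running (min,max) pair per x in one pass instead of storing each group's
-- full point list and re-scanning it with max()/min(); objective: simpler.

-- ===== PORT A =====
-- body of A's 'for i in myLimits' loop: append i to its x-group (create the group on first sight)
def pvStepA (d : PySem.Dict Int (List (Int × Int))) (i : Int × Int) : PySem.Dict Int (List (Int × Int)) :=
  if d.contains i.1 then d.insert i.1 (d.getD i.1 [] ++ [i]) else d.insert i.1 [i]

def get_MinMaxY (myLimits : List (Int × Int)) : (List (Int × Int)) × (List (Int × Int)) :=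
  let store := myLimits.foldl pvStepA PySem.Dict.empty
  let mm := store.items.foldl (fun acc kv =>
      let maxY := (PySem.List.max? (kv.2.map (·.2)) (fun y => y)).getD 0
      let minY := (PySem.List.min? (kv.2.map (·.2)) (fun y => y)).getD 0
      (acc.1 ++ [(kv.1, minY)], acc.2 ++ [(kv.1, maxY)])) (([], []) : List (Int × Int) × List (Int × Int))
  (PySem.List.sorted mm.1 (fun x => x.1), PySem.List.sorted mm.2 (fun x => x.1))

-- ===== PORT B =====
-- body of B's loop: update the running (min,max) pair of x (create it on first sight)
def pvStepB (d : PySem.Dict Int (Int × Int)) (i : Int × Int) : PySem.Dict Int (Int × Int) :=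
  match d.get? i.1 with
  | some p => d.insert i.1 ((if i.2 < p.1 then i.2 else p.1), (if p.2 < i.2 then i.2 else p.2))
  | none => d.insert i.1 (i.2, i.2)

def get_MinMaxY_alt (myLimits : List (Int × Int)) : (List (Int × Int)) × (List (Int × Int)) :=
  let agg := myLimits.foldl pvStepB PySem.Dict.empty
  let ks := PySem.List.sorted agg.keys (fun x => x)
  (ks.map (fun x => (x, (agg.getD x (0, 0)).1)), ks.map (fun x => (x, (agg.getD x (0, 0)).2)))

-- ===== PRECONDITION & SPEC =====
def Spec_get_MinMaxY (myLimits : List (Int × Int)) (out : (List (Int × Int)) × (List (Int × Int))) : Prop := out = get_MinMaxY_alt myLimits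
instance (myLimits : List (Int × Int)) (out : (List (Int × Int)) × (List (Int × Int))) : Decidable (Spec_get_MinMaxY myLimits out) := by unfold Spec_get_MinMaxY; infer_instance

-- ===== CLAIM (what is proved, stated in full; the proofs are below) =====
def Claim_equal_get_MinMaxY : Prop := ∀ (myLimits : List (Int × Int)), Dom_get_MinMaxY myLimits → Spec_get_MinMaxY myLimits (get_MinMaxY myLimits)

-- ===== LEMMAS AND PROOFS =====

-- the (min,max) summary A computes from a group's point list
def pvPairOf (v : List (Int × Int)) : Int × Int :=
  ((PySem.List.min? (v.map (·.2)) (fun y => y)).getD 0,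
   (PySem.List.max? (v.map (·.2)) (fun y => y)).getD 0)

theorem pvStepA_insert (d : PySem.Dict Int (List (Int × Int))) (i : Int × Int) :
    pvStepA d i = d.insert i.1 (if d.contains i.1 then d.getD i.1 [] ++ [i] else [i]) := by
  unfold pvStepA; split_ifs <;> rfl

theorem pvStepB_insert (d : PySem.Dict Int (Int × Int)) (i : Int × Int) :
    pvStepB d i = d.insert i.1 (match d.get? i.1 with
      | some p => ((if i.2 < p.1 then i.2 else p.1), (if p.2 < i.2 then i.2 else p.2))
      | none => (i.2, i.2)) := by
  unfold pvStepB; rcases d.get? i.1 <;> rfl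

-- A's dict maps each seen x to the sublist of points with that x, in order
theorem pv_getA (l : List (Int × Int)) (k : Int) :
    (l.foldl pvStepA PySem.Dict.empty).get? k =
      (if l.filter (fun i => i.1 == k) = [] then none else some (l.filter (fun i => i.1 == k))) := by
  induction l using List.reverseRecOn with
  | nil => rfl
  | append_singleton l x ih =>
    rw [List.foldl_append, List.foldl_cons, List.foldl_nil, List.filter_append]
    by_cases hk : x.1 = k
    · have hx : (List.filter (fun i => i.1 == k) [x]) = [x] := by simp [hk]
      rw [hx]
      by_cases hc : (l.foldl pvStepA PySem.Dict.empty).contains x.1 = true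
      · have hne : l.filter (fun i => i.1 == k) ≠ [] := by
          intro h
          have := ih
          rw [h] at this; simp at this
          rw [PySem.Dict.get?_eq_none_iff_contains] at this
          rw [hk] at hc; rw [this] at hc; simp at hc
        have hgd : (l.foldl pvStepA PySem.Dict.empty).getD k [] = l.filter (fun i => i.1 == k) := by
          show ((l.foldl pvStepA PySem.Dict.empty).get? k).getD [] = _
          rw [ih, if_neg hne]; rfl
        simp only [pvStepA, hc, if_true]
        rw [PySem.Dict.get?_insert, hk, if_pos rfl, hgd]
        simp [hne]
      · have he : l.filter (fun i => i.1 == k) = [] := by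
          by_contra h
          have := ih
          rw [if_neg h] at this
          have : (l.foldl pvStepA PySem.Dict.empty).contains k = true := by
            rw [← Bool.not_eq_false, ← PySem.Dict.get?_eq_none_iff_contains, this]; simp
          rw [hk] at hc; exact hc this
        simp only [pvStepA, hc, if_false, Bool.false_eq_true]
        rw [PySem.Dict.get?_insert, hk, if_pos rfl, he]
        simp
    · have hx : (List.filter (fun i => i.1 == k) [x]) = [] := by simp [hk]
      rw [hx, List.append_nil]
      rw [pvStepA_insert, PySem.Dict.get?_insert, if_neg (fun h => hk h.symm), ih]

-- running (min,max) of a nonempty group absorbs one more point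
theorem pvPairOf_append (v : List (Int × Int)) (hv : v ≠ []) (x : Int × Int) :
    pvPairOf (v ++ [x]) =
      ((if x.2 < (pvPairOf v).1 then x.2 else (pvPairOf v).1),
       (if (pvPairOf v).2 < x.2 then x.2 else (pvPairOf v).2)) := by
  rcases v with _ | ⟨i0, rest⟩
  · exact absurd rfl hv
  · simp only [pvPairOf, List.cons_append, List.map_cons, List.map_append,
      PySem.List.min?_id_cons, PySem.List.max?_id_cons, List.foldl_append, Option.getD_some]
    refine Prod.ext ?_ ?_
    · simp only [List.map_nil, List.foldl_cons, List.foldl_nil]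
      rw [min_def]
      split_ifs <;> omega
    · simp only [List.map_nil, List.foldl_cons, List.foldl_nil]
      rw [max_def]
      split_ifs <;> omega

-- B's dict is A's dict, group lists summarised to their (min,max) pair
theorem pv_getB (l : List (Int × Int)) (k : Int) :
    (l.foldl pvStepB PySem.Dict.empty).get? k =
      ((l.foldl pvStepA PySem.Dict.empty).get? k).map pvPairOf := by
  induction l using List.reverseRecOn generalizing k with
  | nil => rfl
  | append_singleton l x ih =>
    rw [List.foldl_append, List.foldl_cons, List.foldl_nil,
        List.foldl_append, List.foldl_cons, List.foldl_nil]
    by_cases hk : k = x.1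
    · subst hk
      rcases ha : (l.foldl pvStepA PySem.Dict.empty).get? x.1 with _ | v
      · have hb : (l.foldl pvStepB PySem.Dict.empty).get? x.1 = none := by rw [ih, ha]; rfl
        have hcA : (l.foldl pvStepA PySem.Dict.empty).contains x.1 = false := by
          rw [← PySem.Dict.get?_eq_none_iff_contains]; exact ha
        simp only [pvStepB, hb, pvStepA, hcA, Bool.false_eq_true, if_false]
        rw [PySem.Dict.get?_insert, if_pos rfl, PySem.Dict.get?_insert, if_pos rfl]
        simp [pvPairOf, PySem.List.min?_id_cons, PySem.List.max?_id_cons]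
      · have hb : (l.foldl pvStepB PySem.Dict.empty).get? x.1 = some (pvPairOf v) := by
          rw [ih, ha]; rfl
        have hcA : (l.foldl pvStepA PySem.Dict.empty).contains x.1 = true := by
          rw [← Bool.not_eq_false, ← PySem.Dict.get?_eq_none_iff_contains, ha]; simp
        have hvne : v ≠ [] := by
          intro h
          have := pv_getA l x.1
          rw [ha] at this
          by_cases hf : l.filter (fun i => i.1 == x.1) = []
          · rw [if_pos hf] at this; simp at this
          · rw [if_neg hf] at this
            exact hf (by rw [← Option.some_inj.mp this, h])
        have hgd : (l.foldl pvStepA PySem.Dict.empty).getD x.1 [] = v := by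
          show ((l.foldl pvStepA PySem.Dict.empty).get? x.1).getD [] = v
          rw [ha]; rfl
        simp only [pvStepB, hb, pvStepA, hcA, if_true, hgd]
        rw [PySem.Dict.get?_insert, if_pos rfl, PySem.Dict.get?_insert, if_pos rfl,
            Option.map_some, pvPairOf_append v hvne x]
    · rw [pvStepB_insert, pvStepA_insert, PySem.Dict.get?_insert, if_neg hk,
          PySem.Dict.get?_insert, if_neg hk, ih]

theorem pv_keysA (l : List (Int × Int)) :
    (l.foldl pvStepA PySem.Dict.empty).keys = PySem.Set.ofList (l.map (·.1)) := by
  have h : l.foldl pvStepA PySem.Dict.empty =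
      l.foldl (fun d x => d.insert x.1 (if d.contains x.1 then d.getD x.1 [] ++ [x] else [x]))
        PySem.Dict.empty :=
    PySem.List.foldl_congr_mem l _ _ _ (fun d x _ => pvStepA_insert d x)
  rw [h, PySem.Dict.keys_foldl_insert_key]
  rfl

theorem pv_nodup_keysA (l : List (Int × Int)) :
    (l.foldl pvStepA PySem.Dict.empty).keys.Nodup := by
  rw [pv_keysA]; exact PySem.Set.nodup_ofList _

theorem pv_keysB (l : List (Int × Int)) :
    (l.foldl pvStepB PySem.Dict.empty).keys = PySem.Set.ofList (l.map (·.1)) := by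
  have h : l.foldl pvStepB PySem.Dict.empty =
      l.foldl (fun d x => d.insert x.1 (match d.get? x.1 with
        | some p => ((if x.2 < p.1 then x.2 else p.1), (if p.2 < x.2 then x.2 else p.2))
        | none => (x.2, x.2))) PySem.Dict.empty :=
    PySem.List.foldl_congr_mem l _ _ _ (fun d x _ => pvStepB_insert d x)
  rw [h, PySem.Dict.keys_foldl_insert_key]
  rfl

-- sorting pairs with distinct first components by that component = mapping the sorted keys
theorem pv_sorted_map (K : List Int) (hK : (PySem.List.sorted K (fun x => x)).Pairwise (· < ·))
    (g : Int → Int) :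
    PySem.List.sorted (K.map (fun k => (k, g k))) (fun x => x.1) =
      (PySem.List.sorted K (fun x => x)).map (fun k => (k, g k)) := by
  apply PySem.List.sorted_eq_of_perm_of_pairwise_lt
  · exact (PySem.List.sorted_perm K (fun x => x) false).map _
  · exact List.Pairwise.map _ (fun a b h => h) hK

-- ===== VERDICT (by name: the statement is the Claim_ definition above) =====
theorem get_MinMaxY_spec : Claim_equal_get_MinMaxY := by
  intro myLimits _
  show get_MinMaxY myLimits = get_MinMaxY_alt myLimits
  unfold get_MinMaxY get_MinMaxY_alt
  simp only []
  set dA := myLimits.foldl pvStepA PySem.Dict.empty with hdA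
  set dB := myLimits.foldl pvStepB PySem.Dict.empty with hdB
  have hitems : dA.items = dA.keys.map (fun k => (k, dA.getD k [])) :=
    PySem.Dict.items_eq_map_keys dA (pv_nodup_keysA myLimits) []
  have hfold : dA.items.foldl (fun acc kv =>
      (acc.1 ++ [(kv.1, (PySem.List.min? (kv.2.map (·.2)) (fun y => y)).getD 0)],
       acc.2 ++ [(kv.1, (PySem.List.max? (kv.2.map (·.2)) (fun y => y)).getD 0)]))
      (([], []) : List (Int × Int) × List (Int × Int)) =
      (dA.items.map (fun kv => (kv.1, (pvPairOf kv.2).1)),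
       dA.items.map (fun kv => (kv.1, (pvPairOf kv.2).2))) := by
    rw [PySem.List.foldl_prod_mk
      (f := fun (acc : List (Int × Int)) (kv : Int × List (Int × Int)) =>
        acc ++ [(kv.1, (PySem.List.min? (List.map (fun x => x.2) kv.2) fun y => y).getD 0)])
      (g := fun (acc : List (Int × Int)) (kv : Int × List (Int × Int)) =>
        acc ++ [(kv.1, (PySem.List.max? (List.map (fun x => x.2) kv.2) fun y => y).getD 0)]),
      PySem.List.foldl_append_singleton_eq_map, PySem.List.foldl_append_singleton_eq_map]
    rfl
  rw [hfold]
  have hmapped : ∀ sel : Int × Int → Int,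
      dA.items.map (fun kv => (kv.1, sel (pvPairOf kv.2))) =
        dA.keys.map (fun k => (k, sel (pvPairOf (dA.getD k [])))) := by
    intro sel
    rw [hitems, List.map_map]; rfl
  have hget : ∀ k ∈ dA.keys, dB.getD k (0, 0) = pvPairOf (dA.getD k []) := by
    intro k hk
    have hc : dA.contains k = true := (PySem.Dict.contains_iff_mem_keys dA k).mpr hk
    rcases ha : dA.get? k with _ | v
    · rw [PySem.Dict.get?_eq_none_iff_contains] at ha
      rw [ha] at hc; exact absurd hc (by simp)
    · have hb : dB.get? k = some (pvPairOf v) := by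
        rw [hdB, pv_getB, ← hdA, ha]; rfl
      have h1 : dB.getD k (0, 0) = pvPairOf v := by
        show (dB.get? k).getD (0, 0) = _
        rw [hb]; rfl
      have h2 : dA.getD k [] = v := by
        show (dA.get? k).getD [] = _
        rw [ha]; rfl
      rw [h1, h2]
  have hkeysmap : ∀ sel : Int × Int → Int,
      (PySem.List.sorted dA.keys (fun x => x)).map (fun x => (x, sel (dB.getD x (0, 0)))) =
        (PySem.List.sorted dA.keys (fun x => x)).map (fun k => (k, sel (pvPairOf (dA.getD k [])))) := by
    intro sel
    apply List.map_congr_left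
    intro k hk
    rw [hget k ((List.Perm.mem_iff (PySem.List.sorted_perm _ _ false)).mp hk)]
  have hkeq : dB.keys = dA.keys := by rw [hdA, hdB, pv_keysA, pv_keysB]
  have hpw : (PySem.List.sorted dA.keys (fun x => x)).Pairwise (· < ·) := by
    rw [hdA, pv_keysA]; exact PySem.List.sorted_ofList_pairwise_lt _
  rw [hmapped (·.1), hmapped (·.2), hkeq,
      pv_sorted_map dA.keys hpw (fun k => (pvPairOf (dA.getD k [])).1),
      pv_sorted_map dA.keys hpw (fun k => (pvPairOf (dA.getD k [])).2),
      hkeysmap (·.1), hkeysmap (·.2)]
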